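-- pv_equiv track=rewrite | github.com/yashovp/CarTracker | CarTracker.py | data_ordering
-- ===== SOURCE A (Python) =====
-- def data_ordering(final_data):
--     """
--     Iterates through hashmap returned by complie_output_data() function
--     and returns a hashmap where key is distance covered and value is an array of
--     all drivers who've covered that distance.
--     INPUT:
--         hashmap from complie_output_data() function.
--     OUTPUT:
--         hashmap where key is distance covered and value is an array of drivers
--         who've covered that distance.
--     """
--     print_data = {}
--
--     for key in final_data:
--         if final_data[key][0] not in print_data:
--             print_data[final_data[key][0]] = [key]
--         else:
--             holder = print_data[final_data[key][0]]
--             holder.append(key)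
--             holder.sort()
--             print_data[final_data[key][0]] = holder
--
--     return print_data
-- ===== SOURCE B (Python) =====
-- def data_ordering(final_data):
--     """
--     Returns a hashmap mapping each distance to the sorted list of drivers who
--     covered it.  A single global key sort plus one grouping pass (via setdefault)
--     replaces A's per-bucket membership test and repeated re-sorting; a second
--     pass over the original key order reproduces A's bucket insertion order.
--     """
--     groups = {}
--     for key in sorted(final_data):
--         groups.setdefault(final_data[key][0], []).append(key)
--     print_data = {}
--     for key in final_data:
--         d = final_data[key][0]
--         if d not in print_data:
--             print_data[d] = groups[d]
--     return print_data
-- ===== Notes on version B (the rewrite author's own statement) =====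
-- stated objective: alternative
-- what changed: A tests bucket membership per key and re-sorts the whole bucket after every append; B sorts the driver keys once globally, groups them in one setdefault pass (buckets come out sorted for free), then restores A's first-occurrence bucket order in a second linear pass.
import Mathlib
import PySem

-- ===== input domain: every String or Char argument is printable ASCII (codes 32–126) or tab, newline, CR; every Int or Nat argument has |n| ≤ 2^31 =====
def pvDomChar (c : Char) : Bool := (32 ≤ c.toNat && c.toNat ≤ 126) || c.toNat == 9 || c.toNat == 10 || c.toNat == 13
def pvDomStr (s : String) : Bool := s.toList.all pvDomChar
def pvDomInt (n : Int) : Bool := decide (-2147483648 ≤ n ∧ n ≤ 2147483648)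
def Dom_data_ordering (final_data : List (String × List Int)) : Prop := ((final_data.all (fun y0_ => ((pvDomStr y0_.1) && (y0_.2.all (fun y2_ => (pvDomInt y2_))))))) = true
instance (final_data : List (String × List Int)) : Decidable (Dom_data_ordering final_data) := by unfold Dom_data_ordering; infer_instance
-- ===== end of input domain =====

-- B replaces A's per-append bucket re-sort and membership branch by one global key sort,
-- one grouping pass, and an order-restoring pass.


-- ===== PORT A =====
def data_ordering (final_data : List (String × List Int)) : List (Int × List String) :=
  let dd := PySem.Dict.mk final_data
  let pd := dd.keys.foldl (fun pd key =>
      -- final_data[key][0]; the IndexError on an empty value list is excluded by Pre_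
      let d := PySem.List.pyGetD (PySem.Dict.getD dd key []) 0 0
      if PySem.Dict.contains pd d = false then
        PySem.Dict.insert pd d [key]
      else
        let holder := PySem.Dict.getD pd d []
        let holder := PySem.List.sorted (holder ++ [key]) (fun x => x) false
        PySem.Dict.insert pd d holder) PySem.Dict.empty
  pd.items

-- ===== PORT B =====
def data_ordering_alt (final_data : List (String × List Int)) : List (Int × List String) :=
  let dd := PySem.Dict.mk final_data
  -- groups.setdefault(final_data[key][0], []).append(key)  =  modify d [] (· ++ [key])
  let groups := (PySem.List.sorted dd.keys (fun x => x) false).foldl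
      (fun g key =>
        PySem.Dict.modify g (PySem.List.pyGetD (PySem.Dict.getD dd key []) 0 0) []
          (fun h => h ++ [key])) PySem.Dict.empty
  let pd := dd.keys.foldl (fun pd key =>
      let d := PySem.List.pyGetD (PySem.Dict.getD dd key []) 0 0
      if PySem.Dict.contains pd d = false then
        PySem.Dict.insert pd d (PySem.Dict.getD groups d [])
      else pd) PySem.Dict.empty
  pd.items

-- ===== PRECONDITION & SPEC =====
-- Pre_ excludes assoc lists with duplicate keys (a Python dict cannot hold them: construction
-- collapses duplicates, so the list is not a faithful dict) and entries whose value list is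
-- empty (Python A raises IndexError on final_data[key][0] there).
def Pre_data_ordering (final_data : List (String × List Int)) : Prop :=
  (final_data.map Prod.fst).Nodup ∧ ∀ p ∈ final_data, p.2 ≠ []
instance (final_data : List (String × List Int)) : Decidable (Pre_data_ordering final_data) := by
  unfold Pre_data_ordering; infer_instance
def pvWitness_data_ordering : (List (String × List Int)) :=
  [("amy", [3]), ("bob", [3]), ("cal", [5])]
def Spec_data_ordering (final_data : List (String × List Int)) (out : List (Int × List String)) : Prop := out = data_ordering_alt final_data
instance (final_data : List (String × List Int)) (out : List (Int × List String)) : Decidable (Spec_data_ordering final_data out) := by unfold Spec_data_ordering; infer_instance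

-- ===== CLAIM (what is proved, stated in full; the proofs are below) =====
def Claim_equal_data_ordering : Prop := ∀ (final_data : List (String × List Int)), Dom_data_ordering final_data → Pre_data_ordering final_data → Spec_data_ordering final_data (data_ordering final_data)

-- ===== LEMMAS AND PROOFS =====

-- the distance of a driver key (final_data[key][0] as the ports compute it)
def distOf (fd : List (String × List Int)) (key : String) : Int :=
  PySem.List.pyGetD (PySem.Dict.getD (PySem.Dict.mk fd) key []) 0 0

-- the distances in order of first occurrence
def occs (l : List Int) : List Int :=
  l.foldl (fun acc d => if d ∈ acc then acc else acc ++ [d]) []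

-- the sorted bucket of drivers at distance d
def bucket (fd : List (String × List Int)) (ks : List String) (d : Int) : List String :=
  PySem.List.sorted (ks.filter (fun k => distOf fd k == d)) (fun x => x) false

theorem mem_foldl_occs (l : List Int) (acc : List Int) (a : Int) :
    a ∈ l.foldl (fun acc d => if d ∈ acc then acc else acc ++ [d]) acc ↔ a ∈ acc ∨ a ∈ l := by
  induction l generalizing acc with
  | nil => simp
  | cons x t ih =>
    simp only [List.foldl_cons, ih]
    by_cases hx : x ∈ acc
    · simp only [hx, if_true, List.mem_cons]
      exact ⟨fun h => h.imp id Or.inr,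
        fun h => h.elim Or.inl (fun h => h.elim (fun e => Or.inl (e ▸ hx)) Or.inr)⟩
    · simp [hx, List.mem_append, or_assoc]

theorem mem_occs (l : List Int) (a : Int) : a ∈ occs l ↔ a ∈ l := by
  simp [occs, mem_foldl_occs]

theorem nodup_foldl_occs (l : List Int) (acc : List Int) (h : acc.Nodup) :
    (l.foldl (fun acc d => if d ∈ acc then acc else acc ++ [d]) acc).Nodup := by
  induction l generalizing acc with
  | nil => simpa
  | cons x t ih =>
    simp only [List.foldl_cons]
    by_cases hx : x ∈ acc
    · simpa [hx] using ih acc h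
    · simp only [hx, if_false]
      refine ih _ ?_
      simp only [List.nodup_append, h, List.nodup_singleton, true_and]
      intro a ha b hb
      simp only [List.mem_singleton] at hb
      exact fun e => hx (by rw [← hb, ← e] at hx ⊢; exact ha)

theorem nodup_occs (l : List Int) : (occs l).Nodup :=
  nodup_foldl_occs l [] List.nodup_nil

theorem occs_append (l : List Int) (x : Int) :
    occs (l ++ [x]) = if x ∈ occs l then occs l else occs l ++ [x] := by
  simp [occs, List.foldl_append]

-- sorting commutes with filtering (identity key, so no duplicate-freedom needed)
theorem sorted_filter_comm (ks : List String) (q : String → Bool) :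
    PySem.List.sorted (ks.filter q) (fun x => x) false
      = (PySem.List.sorted ks (fun x => x) false).filter q := by
  apply PySem.List.sorted_id_eq_of_perm_of_pairwise
  · exact (PySem.List.sorted_perm ks (fun x => x) false).filter q
  · exact List.Pairwise.sublist List.filter_sublist (PySem.List.sorted_pairwise ks (fun x => x))

theorem keys_mkmap (L : List Int) (f : Int → List String) :
    (PySem.Dict.mk (L.map (fun d => (d, f d)))).keys = L := by
  simp [PySem.Dict.keys_mk, List.map_map, Function.comp_def]

theorem contains_mkmap (L : List Int) (f : Int → List String) (d : Int) :
    PySem.Dict.contains (PySem.Dict.mk (L.map (fun d => (d, f d)))) d = decide (d ∈ L) := by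
  rw [PySem.Dict.contains_eq_decide_mem_keys (PySem.Dict.mk (L.map (fun d => (d, f d)))) d,
    keys_mkmap]

theorem getD_mkmap (L : List Int) (f : Int → List String) (d : Int) (hnd : L.Nodup) (hd : d ∈ L) :
    PySem.Dict.getD (PySem.Dict.mk (L.map (fun d => (d, f d)))) d [] = f d := by
  have hmemi : (d, f d) ∈ (L.map (fun d => (d, f d))) := List.mem_map_of_mem hd
  have hk : (PySem.Dict.mk (L.map (fun d => (d, f d)))).keys.Nodup := by
    rw [keys_mkmap]; exact hnd
  exact PySem.Dict.getD_of_mem_items _ hmemi hk []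

-- A's loop, in closed form
theorem foldA_eq (fd : List (String × List Int)) (ks : List String) :
    ks.foldl (fun pd key =>
      let d := PySem.List.pyGetD (PySem.Dict.getD (PySem.Dict.mk fd) key []) 0 0
      if PySem.Dict.contains pd d = false then
        PySem.Dict.insert pd d [key]
      else
        let holder := PySem.Dict.getD pd d []
        let holder := PySem.List.sorted (holder ++ [key]) (fun x => x) false
        PySem.Dict.insert pd d holder) PySem.Dict.empty
    = PySem.Dict.mk ((occs (ks.map (distOf fd))).map (fun d => (d, bucket fd ks d))) := by
  induction ks using List.reverseRecOn with
  | nil => rfl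
  | append_singleton ks k ih =>
    rw [List.foldl_append, ih]
    simp only [List.foldl_cons, List.foldl_nil]
    have hdk : PySem.List.pyGetD (PySem.Dict.getD (PySem.Dict.mk fd) k []) 0 0 = distOf fd k := rfl
    have hds : (ks ++ [k]).map (distOf fd) = ks.map (distOf fd) ++ [distOf fd k] := by simp
    have hitems : PySem.Dict.items
        (PySem.Dict.mk ((occs (ks.map (distOf fd))).map (fun d => (d, bucket fd ks d))))
        = (occs (ks.map (distOf fd))).map (fun d => (d, bucket fd ks d)) := rfl
    by_cases hmem : distOf fd k ∈ occs (ks.map (distOf fd))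
    · -- the distance already has a bucket: append + re-sort
      have hc : PySem.Dict.contains
          (PySem.Dict.mk ((occs (ks.map (distOf fd))).map (fun d => (d, bucket fd ks d))))
          (distOf fd k) = true := by
        rw [contains_mkmap]; simpa using hmem
      have hocc : occs ((ks ++ [k]).map (distOf fd)) = occs (ks.map (distOf fd)) := by
        rw [hds, occs_append, if_pos hmem]
      simp only [hdk]
      rw [if_neg (by simp [hc])]
      rw [getD_mkmap _ _ _ (nodup_occs _) hmem]
      apply PySem.Dict.ext
      rw [PySem.Dict.items_insert_of_contains _ _ hc, hocc, hitems, List.map_map]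
      apply List.map_congr_left
      intro d' hd'
      simp only [Function.comp_apply]
      by_cases he : d' = distOf fd k
      · rw [if_pos (by simp [he])]
        rw [he]
        have hfil : (ks ++ [k]).filter (fun x => distOf fd x == distOf fd k) =
            ks.filter (fun x => distOf fd x == distOf fd k) ++ [k] := by
          rw [List.filter_append]; simp
        refine congrArg (fun z => (distOf fd k, z)) ?_
        show PySem.List.sorted (bucket fd ks (distOf fd k) ++ [k]) (fun x => x) false
          = bucket fd (ks ++ [k]) (distOf fd k)
        rw [bucket, bucket, hfil]
        exact PySem.List.sorted_eq_sorted_of_perm _ _ _ (fun a b h => h)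
          ((PySem.List.sorted_perm _ _ _).append (List.Perm.refl [k]))
      · have hbe : (d' == distOf fd k) = false := beq_eq_false_iff_ne.mpr he
        rw [if_neg (by simp [hbe])]
        have hbe2 : (distOf fd k == d') = false := beq_eq_false_iff_ne.mpr (Ne.symm he)
        have hfil : (ks ++ [k]).filter (fun x => distOf fd x == d') =
            ks.filter (fun x => distOf fd x == d') := by
          rw [List.filter_append]; simp [hbe2]
        rw [bucket, bucket, hfil]
    · -- a fresh distance: a new singleton bucket is appended
      have hc : PySem.Dict.contains
          (PySem.Dict.mk ((occs (ks.map (distOf fd))).map (fun d => (d, bucket fd ks d))))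
          (distOf fd k) = false := by
        rw [contains_mkmap]; simpa using hmem
      have hocc : occs ((ks ++ [k]).map (distOf fd)) =
          occs (ks.map (distOf fd)) ++ [distOf fd k] := by
        rw [hds, occs_append, if_neg hmem]
      have hnotin : distOf fd k ∉ ks.map (distOf fd) := by
        rw [← mem_occs]; exact hmem
      simp only [hdk]
      rw [if_pos hc]
      apply PySem.Dict.ext
      rw [PySem.Dict.items_insert_of_not_contains _ _ hc, hocc, hitems, List.map_append]
      congr 1
      · apply List.map_congr_left
        intro d' hd'
        have he : d' ≠ distOf fd k := fun e => hmem (e ▸ hd')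
        have hbe2 : (distOf fd k == d') = false := beq_eq_false_iff_ne.mpr (Ne.symm he)
        have hfil : (ks ++ [k]).filter (fun x => distOf fd x == d') =
            ks.filter (fun x => distOf fd x == d') := by
          rw [List.filter_append]; simp [hbe2]
        rw [bucket, bucket, hfil]
      · have hnilf : ks.filter (fun x => distOf fd x == distOf fd k) = [] := by
          refine List.filter_eq_nil_iff.mpr (fun x hx hbe => ?_)
          exact hnotin (by
            rw [← (by simpa using hbe : distOf fd x = distOf fd k)]
            exact List.mem_map_of_mem hx)
        have hfil : (ks ++ [k]).filter (fun x => distOf fd x == distOf fd k) = [k] := by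
          rw [List.filter_append, hnilf]; simp
        rw [List.map_singleton, bucket, hfil]
        refine congrArg (fun z => [(distOf fd k, z)]) ?_
        exact (PySem.List.sorted_eq_self_of_pairwise _ _ (by simp)).symm

-- B's grouping dict, looked up: the (globally sorted) drivers at distance d
theorem groups_getD (fd : List (String × List Int)) (l : List String) (d : Int) :
    PySem.Dict.getD (l.foldl
      (fun g key =>
        PySem.Dict.modify g (PySem.List.pyGetD (PySem.Dict.getD (PySem.Dict.mk fd) key []) 0 0) []
          (fun h => h ++ [key])) PySem.Dict.empty) d []
    = l.filter (fun k => distOf fd k == d) := by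
  have h1 : (l.foldl
      (fun g key =>
        PySem.Dict.modify g (PySem.List.pyGetD (PySem.Dict.getD (PySem.Dict.mk fd) key []) 0 0) []
          (fun h => h ++ [key])) PySem.Dict.empty)
      = ((l.map (fun k => (distOf fd k, k))).foldl
          (fun g p => PySem.Dict.modify g p.1 [] (fun h => h ++ [p.2])) PySem.Dict.empty) := by
    rw [List.foldl_map]
    rfl
  rw [h1, PySem.Dict.getD_foldl_modify_append, PySem.Dict.getD_empty]
  rw [List.filter_map]
  simp [Function.comp_def, List.map_map]

-- B's ordering loop, in closed form
theorem foldB_eq (fd : List (String × List Int)) (G : PySem.Dict Int (List String)) (ks : List String) :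
    ks.foldl (fun pd key =>
      let d := PySem.List.pyGetD (PySem.Dict.getD (PySem.Dict.mk fd) key []) 0 0
      if PySem.Dict.contains pd d = false then
        PySem.Dict.insert pd d (PySem.Dict.getD G d [])
      else pd) PySem.Dict.empty
    = PySem.Dict.mk ((occs (ks.map (distOf fd))).map (fun d => (d, PySem.Dict.getD G d []))) := by
  induction ks using List.reverseRecOn with
  | nil => rfl
  | append_singleton ks k ih =>
    rw [List.foldl_append, ih]
    simp only [List.foldl_cons, List.foldl_nil]
    have hdk : PySem.List.pyGetD (PySem.Dict.getD (PySem.Dict.mk fd) k []) 0 0 = distOf fd k := rfl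
    have hds : (ks ++ [k]).map (distOf fd) = ks.map (distOf fd) ++ [distOf fd k] := by simp
    by_cases hmem : distOf fd k ∈ occs (ks.map (distOf fd))
    · have hc : PySem.Dict.contains
          (PySem.Dict.mk ((occs (ks.map (distOf fd))).map (fun d => (d, PySem.Dict.getD G d []))))
          (distOf fd k) = true := by
        rw [contains_mkmap]; simpa using hmem
      simp only [hdk]
      rw [if_neg (by simp [hc])]
      rw [hds, occs_append, if_pos hmem]
    · have hc : PySem.Dict.contains
          (PySem.Dict.mk ((occs (ks.map (distOf fd))).map (fun d => (d, PySem.Dict.getD G d []))))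
          (distOf fd k) = false := by
        rw [contains_mkmap]; simpa using hmem
      simp only [hdk]
      rw [if_pos hc]
      apply PySem.Dict.ext
      rw [PySem.Dict.items_insert_of_not_contains _ _ hc]
      rw [hds, occs_append, if_neg hmem, List.map_append]
      rfl

-- ===== VERDICT (by name: the statement is the Claim_ definition above) =====
theorem data_ordering_spec : Claim_equal_data_ordering := by
  intro fd _ _
  show data_ordering fd = data_ordering_alt fd
  simp only [data_ordering, data_ordering_alt]
  rw [foldA_eq, foldB_eq]
  refine congrArg (fun L => (PySem.Dict.mk L).items) ?_
  apply List.map_congr_left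
  intro d hd
  refine congrArg (fun z => (d, z)) ?_
  rw [groups_getD, bucket, sorted_filter_comm]
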